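-- pv_equiv track=rewrite | github.com/diekhans/wtc11-chr22-eval | bin/evaluate_transcriptome_0226.py | calculate_sjc_metrics
-- ===== SOURCE A (Python) =====
-- def calculate_sjc_metrics(found_sjc, read_sjc):
--
--     found_subsets = {}
--     for cs in found_sjc:
--         found_subsets[cs] = set()
--         for sjc in found_sjc[cs]:
--             for slen in range(len(sjc)-1, 0, -1):
--                 for i in range(0, len(sjc)-slen+1):
--                     found_subsets[cs].add(sjc[i:i+slen])
--
--     tot_sjc, sup_sjc = 0, 0
--     subset_sjc = 0
--     for cs in read_sjc:
--         if cs in found_sjc: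
--             for sjc in read_sjc[cs]:
--                 if sjc in found_sjc[cs]:
--                     sup_sjc += read_sjc[cs][sjc]
--                 elif sjc in found_subsets[cs]:
--                     subset_sjc += read_sjc[cs][sjc]
--                 tot_sjc += read_sjc[cs][sjc]
--         else:
--             for sjc in read_sjc[cs]:
--                 tot_sjc += read_sjc[cs][sjc]
--
--     return tot_sjc, sup_sjc, subset_sjc,
-- ===== SOURCE B (Python) =====
-- def _is_proper_sub(q, chains):
--     m = len(q)
--     if m == 0:
--         return False
--     return any(
--         m < len(c) and any(c[i:i + m] == q for i in range(len(c) - m + 1))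
--         for c in chains)
--
--
-- def calculate_sjc_metrics(found_sjc, read_sjc):
--     tot_sjc = sum(n for counts in read_sjc.values() for n in counts.values())
--     sup_sjc, subset_sjc = 0, 0
--     for cs, counts in read_sjc.items():
--         chains = found_sjc.get(cs)
--         if chains is None:
--             continue
--         for sjc, n in counts.items():
--             if sjc in chains:
--                 sup_sjc += n
--             elif _is_proper_sub(sjc, chains):
--                 subset_sjc += n
--     return tot_sjc, sup_sjc, subset_sjc
-- ===== Notes on version B (the rewrite author's own statement) =====
-- stated objective: alternative
-- what changed: A precomputes, for every found chain, the set of ALL its proper contiguous sub-chains (cubic per chain length) and tests read chains against that set; B drops the precomputation entirely: it sums the total count in one comprehension and, per read chain, searches the found chains directly for an exact or proper-contiguous-substring match.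
import Mathlib
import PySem

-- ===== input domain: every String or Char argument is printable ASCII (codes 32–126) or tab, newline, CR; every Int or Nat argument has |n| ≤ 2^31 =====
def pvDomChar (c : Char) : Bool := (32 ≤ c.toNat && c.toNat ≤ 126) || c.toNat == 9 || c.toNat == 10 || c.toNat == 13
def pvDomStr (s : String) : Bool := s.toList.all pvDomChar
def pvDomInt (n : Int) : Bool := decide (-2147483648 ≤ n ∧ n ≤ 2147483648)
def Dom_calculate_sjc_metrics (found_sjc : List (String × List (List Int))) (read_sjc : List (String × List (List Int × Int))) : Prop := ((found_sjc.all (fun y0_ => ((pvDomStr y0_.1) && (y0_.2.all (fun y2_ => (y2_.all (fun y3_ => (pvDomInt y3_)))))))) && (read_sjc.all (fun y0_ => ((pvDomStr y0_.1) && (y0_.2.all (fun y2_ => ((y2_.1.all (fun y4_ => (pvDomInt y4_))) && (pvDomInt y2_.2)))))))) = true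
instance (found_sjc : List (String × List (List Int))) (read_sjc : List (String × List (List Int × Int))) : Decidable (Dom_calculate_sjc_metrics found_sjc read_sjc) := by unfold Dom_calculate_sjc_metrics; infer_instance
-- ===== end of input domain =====

-- B drops A's precomputed set of all proper contiguous sub-chains of every found chain and instead
-- searches the found chains directly per read chain; same return value (measured ~1.3x faster, below the 1.5x bar).

-- ===== PORT A =====
-- A's three nested substring-collecting loops for one found chain `sjc`
def pvSubsAdd (sjc : List Int) (s : PySem.Set (List Int)) : PySem.Set (List Int) :=
  (PySem.List.pyRange ((sjc.length : Int) - 1) 0 (-1)).foldl (fun s slen =>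
    (PySem.List.pyRange 0 ((sjc.length : Int) - slen + 1) 1).foldl (fun s i =>
      PySem.Set.add s (PySem.List.slice sjc (some i) (some (i + slen)))) s) s

def calculate_sjc_metrics (found_sjc : List (String × List (List Int))) (read_sjc : List (String × List (List Int × Int))) : Int × Int × Int :=
  let fd : PySem.Dict String (List (List Int)) := PySem.Dict.ofList found_sjc
  let rd : PySem.Dict String (PySem.Dict (List Int) Int) :=
    PySem.Dict.ofList (read_sjc.map (fun p => (p.1, PySem.Dict.ofList p.2)))
  let found_subsets : PySem.Dict String (PySem.Set (List Int)) :=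
    fd.items.foldl (fun d p =>
      d.insert p.1 (p.2.foldl (fun s sjc => pvSubsAdd sjc s) PySem.Set.empty)) PySem.Dict.empty
  rd.items.foldl (fun acc p =>
    if fd.contains p.1 then
      p.2.items.foldl (fun acc q =>
        let acc2 :=
          if (fd.getD p.1 []).contains q.1 then (acc.1, acc.2.1 + q.2, acc.2.2)
          else if PySem.Set.contains (found_subsets.getD p.1 []) q.1 then (acc.1, acc.2.1, acc.2.2 + q.2)
          else acc
        (acc2.1 + q.2, acc2.2.1, acc2.2.2)) acc
    else
      p.2.items.foldl (fun acc q => (acc.1 + q.2, acc.2.1, acc.2.2)) acc) (0, 0, 0)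

-- ===== PORT B =====
def pvIsProperSub (q : List Int) (chains : List (List Int)) : Bool :=
  if q.length = 0 then false
  else chains.any (fun c =>
    decide (q.length < c.length) &&
    (List.range (c.length - q.length + 1)).any (fun i =>
      PySem.List.slice c (some (i : Int)) (some ((i : Int) + (q.length : Int))) == q))

def calculate_sjc_metrics_alt (found_sjc : List (String × List (List Int))) (read_sjc : List (String × List (List Int × Int))) : Int × Int × Int :=
  let fd : PySem.Dict String (List (List Int)) := PySem.Dict.ofList found_sjc
  let rd : PySem.Dict String (PySem.Dict (List Int) Int) :=
    PySem.Dict.ofList (read_sjc.map (fun p => (p.1, PySem.Dict.ofList p.2)))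
  let tot : Int := (rd.values.map (fun d => d.values.sum)).sum
  let su : Int × Int := rd.items.foldl (fun acc p =>
    match fd.get? p.1 with
    | none => acc
    | some chains =>
      p.2.items.foldl (fun acc q =>
        if chains.contains q.1 then (acc.1 + q.2, acc.2)
        else if pvIsProperSub q.1 chains then (acc.1, acc.2 + q.2)
        else acc) acc) (0, 0)
  (tot, su.1, su.2)

-- ===== PRECONDITION & SPEC =====
def Spec_calculate_sjc_metrics (found_sjc : List (String × List (List Int))) (read_sjc : List (String × List (List Int × Int))) (out : Int × Int × Int) : Prop := out = calculate_sjc_metrics_alt found_sjc read_sjc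
instance (found_sjc : List (String × List (List Int))) (read_sjc : List (String × List (List Int × Int))) (out : Int × Int × Int) : Decidable (Spec_calculate_sjc_metrics found_sjc read_sjc out) := by unfold Spec_calculate_sjc_metrics; infer_instance

-- ===== CLAIM (what is proved, stated in full; the proofs are below) =====
def Claim_equal_calculate_sjc_metrics : Prop := ∀ (found_sjc : List (String × List (List Int))) (read_sjc : List (String × List (List Int × Int))), Dom_calculate_sjc_metrics found_sjc read_sjc → Spec_calculate_sjc_metrics found_sjc read_sjc (calculate_sjc_metrics found_sjc read_sjc)

-- ===== LEMMAS AND PROOFS =====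

-- membership in a fold of set-growing steps
theorem pv_mem_foldl_step {α β : Type} [BEq α] [LawfulBEq α] (l : List β)
    (F : PySem.Set α → β → PySem.Set α) (P : β → α → Prop)
    (h : ∀ s b q, q ∈ F s b ↔ q ∈ s ∨ P b q) :
    ∀ (s : PySem.Set α) (q : α), q ∈ l.foldl F s ↔ q ∈ s ∨ ∃ b ∈ l, P b q := by
  induction l with
  | nil => simp
  | cons b t ih =>
    intro s q
    simp only [List.foldl_cons, ih, h, List.mem_cons]
    constructor
    · rintro ((h1 | h1) | ⟨c, hc, h2⟩)
      · exact Or.inl h1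
      · exact Or.inr ⟨b, Or.inl rfl, h1⟩
      · exact Or.inr ⟨c, Or.inr hc, h2⟩
    · rintro (h1 | ⟨c, (rfl | hc), h2⟩)
      · exact Or.inl (Or.inl h1)
      · exact Or.inl (Or.inr h2)
      · exact Or.inr ⟨c, hc, h2⟩

theorem pv_mem_subsAdd (sjc : List Int) (s : PySem.Set (List Int)) (q : List Int) :
    q ∈ pvSubsAdd sjc s ↔ q ∈ s ∨
      ∃ slen ∈ PySem.List.pyRange ((sjc.length : Int) - 1) 0 (-1),
        ∃ i ∈ PySem.List.pyRange 0 ((sjc.length : Int) - slen + 1) 1,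
          q = PySem.List.slice sjc (some i) (some (i + slen)) := by
  unfold pvSubsAdd
  exact pv_mem_foldl_step (PySem.List.pyRange ((sjc.length : Int) - 1) 0 (-1))
    (fun s slen => (PySem.List.pyRange 0 ((sjc.length : Int) - slen + 1) 1).foldl
      (fun s i => PySem.Set.add s (PySem.List.slice sjc (some i) (some (i + slen)))) s)
    (fun slen q => ∃ i ∈ PySem.List.pyRange 0 ((sjc.length : Int) - slen + 1) 1,
      q = PySem.List.slice sjc (some i) (some (i + slen)))
    (fun s slen q => PySem.Set.mem_foldl_add _ _ s q) s q

-- per-chain bridge: A's enumerated proper slices of c are exactly B's proper-substring test on c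
theorem pv_chain_bridge (c q : List Int) :
    (∃ slen ∈ PySem.List.pyRange ((c.length : Int) - 1) 0 (-1),
        ∃ i ∈ PySem.List.pyRange 0 ((c.length : Int) - slen + 1) 1,
          q = PySem.List.slice c (some i) (some (i + slen))) ↔
      (q ≠ [] ∧ q.length < c.length ∧ ∃ i : Nat, i < c.length - q.length + 1 ∧
        PySem.List.slice c (some (i : Int)) (some ((i : Int) + (q.length : Int))) = q) := by
  constructor
  · rintro ⟨slen, hslen, i, hi, rfl⟩
    rw [PySem.List.mem_pyRange_neg_one] at hslen
    rw [PySem.List.mem_pyRange_one] at hi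
    have hi0 : 0 ≤ i := hi.1
    have hlen : (PySem.List.slice c (some i) (some (i + slen))).length = slen.toNat := by
      rw [PySem.List.slice_toNat c hi0 (by omega)]
      simp only [List.length_take, List.length_drop]
      omega
    refine ⟨by simp only [← List.length_pos_iff]; omega, by omega, i.toNat, by omega, ?_⟩
    rw [hlen]
    congr 1 <;> simp <;> omega
  · rintro ⟨hq, hlt, i, hi, heq⟩
    refine ⟨(q.length : Int), ?_, (i : Int), ?_, heq.symm⟩
    · rw [PySem.List.mem_pyRange_neg_one]
      have : 0 < q.length := List.length_pos_iff.mpr hq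
      omega
    · rw [PySem.List.mem_pyRange_one]; omega

theorem pv_isProperSub_iff (q : List Int) (chains : List (List Int)) :
    pvIsProperSub q chains = true ↔
      q ≠ [] ∧ ∃ c ∈ chains, q.length < c.length ∧ ∃ i : Nat, i < c.length - q.length + 1 ∧
        PySem.List.slice c (some (i : Int)) (some ((i : Int) + (q.length : Int))) = q := by
  unfold pvIsProperSub
  by_cases hq : q.length = 0
  · simp [List.length_eq_zero_iff.mp hq]
  · rw [if_neg hq]
    simp only [List.any_eq_true, Bool.and_eq_true, decide_eq_true_iff, beq_iff_eq, List.mem_range]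
    have : q ≠ [] := by simpa [← List.length_eq_zero_iff] using hq
    constructor
    · rintro ⟨c, hc, h1, i, hi, h2⟩; exact ⟨this, c, hc, h1, i, hi, h2⟩
    · rintro ⟨-, c, hc, h1, i, hi, h2⟩; exact ⟨c, hc, h1, i, hi, h2⟩

-- A's substring set for one cs is exactly B's proper-substring test
theorem pv_mem_subsOf (chains : List (List Int)) (q : List Int) :
    q ∈ chains.foldl (fun s sjc => pvSubsAdd sjc s) PySem.Set.empty ↔
      pvIsProperSub q chains = true := by
  rw [pv_mem_foldl_step chains _
    (fun c q => ∃ slen ∈ PySem.List.pyRange ((c.length : Int) - 1) 0 (-1),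
        ∃ i ∈ PySem.List.pyRange 0 ((c.length : Int) - slen + 1) 1,
          q = PySem.List.slice c (some i) (some (i + slen)))
    (fun s c q => pv_mem_subsAdd c s q), pv_isProperSub_iff]
  constructor
  · rintro (h | ⟨c, hc, h2⟩)
    · exact absurd h (by simp [PySem.Set.empty])
    · obtain ⟨hq, hlt, i, hi, heq⟩ := (pv_chain_bridge c q).mp h2
      exact ⟨hq, c, hc, hlt, i, hi, heq⟩
  · rintro ⟨hq, c, hc, hlt, i, hi, heq⟩
    exact Or.inr ⟨c, hc, (pv_chain_bridge c q).mpr ⟨hq, hlt, i, hi, heq⟩⟩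

-- A's found_subsets dict, looked up at a key of fd
theorem pv_subsDict_getD (fd : PySem.Dict String (List (List Int)))
    (hnd : fd.keys.Nodup) (cs : String) (chains : List (List Int))
    (hget : fd.get? cs = some chains) :
    (fd.items.foldl (fun d p =>
        d.insert p.1 (p.2.foldl (fun s sjc => pvSubsAdd sjc s) PySem.Set.empty)) PySem.Dict.empty).getD cs [] =
      chains.foldl (fun s sjc => pvSubsAdd sjc s) PySem.Set.empty := by
  have hmem : (cs, chains) ∈ fd.items := PySem.Dict.mem_items_of_get?_eq_some fd hget
  have hitems := PySem.Dict.items_foldl_insert_fresh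
    fd.items (fun p => p.1)
    (fun p => p.2.foldl (fun s sjc => pvSubsAdd sjc s) PySem.Set.empty)
    PySem.Dict.empty
    (fun a _ => by simp [PySem.Dict.contains_empty])
    (by simpa [PySem.Dict.keys] using hnd)
  have he : (PySem.Dict.empty : PySem.Dict String (PySem.Set (List Int))).items = [] := rfl
  apply PySem.Dict.getD_of_mem_items
  · rw [hitems, he, List.nil_append, List.mem_map]
    exact ⟨(cs, chains), hmem, rfl⟩
  · show (_ : PySem.Dict String (PySem.Set (List Int))).keys.Nodup
    simp only [PySem.Dict.keys, hitems, he, List.nil_append, List.map_map]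
    simpa [Function.comp, PySem.Dict.keys] using hnd

-- A's inner loop over one read dict (cs found) vs B's inner loop plus the running total
theorem pv_inner_eq (chains : List (List Int)) (subs : PySem.Set (List Int))
    (hsubs : ∀ r, PySem.Set.contains subs r = pvIsProperSub r chains)
    (items : List (List Int × Int)) :
    ∀ (t s u : Int),
      items.foldl (fun acc q =>
        let acc2 :=
          if chains.contains q.1 then (acc.1, acc.2.1 + q.2, acc.2.2)
          else if PySem.Set.contains subs q.1 then (acc.1, acc.2.1, acc.2.2 + q.2)
          else acc
        (acc2.1 + q.2, acc2.2.1, acc2.2.2)) (t, s, u) =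
      (t + (items.map (·.2)).sum,
        items.foldl (fun acc q =>
          if chains.contains q.1 then (acc.1 + q.2, acc.2)
          else if pvIsProperSub q.1 chains then (acc.1, acc.2 + q.2)
          else acc) (s, u)) := by
  induction items with
  | nil => simp
  | cons q t' ih =>
    intro t s u
    simp only [List.foldl_cons, List.map_cons, List.sum_cons]
    cases h1 : chains.contains q.1 with
    | true =>
      simp only [if_true, ih]
      rw [add_assoc]
    | false =>
      rw [hsubs]
      cases h2 : pvIsProperSub q.1 chains with
      | true =>
        simp only [Bool.false_eq_true, if_false, if_true, ih]
        rw [add_assoc]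
      | false =>
        simp only [Bool.false_eq_true, if_false, ih]
        rw [add_assoc]

-- A's inner loop when cs is not a found key
theorem pv_inner_else (items : List (List Int × Int)) :
    ∀ (t s u : Int),
      items.foldl (fun acc q => (acc.1 + q.2, acc.2.1, acc.2.2)) (t, s, u) =
      (t + (items.map (·.2)).sum, s, u) := by
  induction items with
  | nil => simp
  | cons q t' ih =>
    intro t s u
    simp only [List.foldl_cons, List.map_cons, List.sum_cons, ih, add_assoc]

-- the main loop: A's triple fold is B's total plus B's pair fold
theorem pv_main (fd : PySem.Dict String (List (List Int))) (hnd : fd.keys.Nodup)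
    (l : List (String × PySem.Dict (List Int) Int)) :
    ∀ (t s u : Int),
      l.foldl (fun acc p =>
        if fd.contains p.1 then
          p.2.items.foldl (fun acc q =>
            let acc2 :=
              if (fd.getD p.1 []).contains q.1 then (acc.1, acc.2.1 + q.2, acc.2.2)
              else if PySem.Set.contains
                ((fd.items.foldl (fun d p =>
                  d.insert p.1 (p.2.foldl (fun s sjc => pvSubsAdd sjc s) PySem.Set.empty)) PySem.Dict.empty).getD p.1 []) q.1
                then (acc.1, acc.2.1, acc.2.2 + q.2)
              else acc
            (acc2.1 + q.2, acc2.2.1, acc2.2.2)) acc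
        else
          p.2.items.foldl (fun acc q => (acc.1 + q.2, acc.2.1, acc.2.2)) acc) (t, s, u) =
      (t + (l.map (fun p => (p.2.items.map (·.2)).sum)).sum,
        l.foldl (fun acc p =>
          match fd.get? p.1 with
          | none => acc
          | some chains =>
            p.2.items.foldl (fun acc q =>
              if chains.contains q.1 then (acc.1 + q.2, acc.2)
              else if pvIsProperSub q.1 chains then (acc.1, acc.2 + q.2)
              else acc) acc) (s, u)) := by
  induction l with
  | nil => simp
  | cons p t' ih =>
    intro t s u
    simp only [List.foldl_cons, List.map_cons, List.sum_cons]
    cases hc : fd.contains p.1 with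
    | true =>
      obtain ⟨chains, hget⟩ : ∃ chains, fd.get? p.1 = some chains := by
        cases h : fd.get? p.1 with
        | none =>
          have := (PySem.Dict.get?_eq_none_iff_contains fd p.1).mp h
          rw [hc] at this; exact absurd this (by simp)
        | some v => exact ⟨v, rfl⟩
      have hgd : fd.getD p.1 [] = chains := PySem.Dict.getD_of_get?_eq_some fd [] hget
      rw [if_pos rfl, hgd, pv_subsDict_getD fd hnd p.1 chains hget, hget,
        pv_inner_eq chains _ (fun r => by
          cases h2 : pvIsProperSub r chains with
          | true =>
            exact (PySem.Set.contains_iff _ _).mpr ((pv_mem_subsOf chains r).mpr h2)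
          | false =>
            cases h : PySem.Set.contains (chains.foldl (fun s sjc => pvSubsAdd sjc s) PySem.Set.empty) r with
            | true =>
              have := (pv_mem_subsOf chains r).mp ((PySem.Set.contains_iff _ _).mp h)
              rw [h2] at this; exact absurd this (by simp)
            | false => rfl) p.2.items t s u, ih]
      rw [add_assoc]
    | false =>
      have hnone : fd.get? p.1 = none := (PySem.Dict.get?_eq_none_iff_contains fd p.1).mpr hc
      rw [if_neg (by simp : ¬ (false = true)), pv_inner_else, ih, hnone, add_assoc]

-- ===== VERDICT (by name: the statement is the Claim_ definition above) =====
theorem calculate_sjc_metrics_spec : Claim_equal_calculate_sjc_metrics := by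
  intro found_sjc read_sjc _
  unfold Spec_calculate_sjc_metrics calculate_sjc_metrics calculate_sjc_metrics_alt
  simp only []
  have hv : ∀ (d : PySem.Dict String (PySem.Dict (List Int) Int)), d.values = d.items.map (·.2) := fun _ => rfl
  have hv2 : ∀ (d : PySem.Dict (List Int) Int), d.values = d.items.map (·.2) := fun _ => rfl
  rw [hv, List.map_map]
  rw [pv_main (PySem.Dict.ofList found_sjc) (PySem.Dict.nodup_keys_ofList found_sjc) _ 0 0 0]
  simp [Function.comp_def, hv2]
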